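-- pv_equiv track=rewrite | github.com/YasuoFly/ThemeRecognition | utils/utils.py | combine_word
-- ===== SOURCE A (Python) =====
-- def combine_word(lemmas_sent):
--     flag = False
--     phrase = ""
--     caption = []
--     for tag in lemmas_sent:
--         if tag[1] == "NN" or tag[1]  == "JJ":
--             flag = True
--             phrase = phrase + tag[0] # 合词
--         else:
--             if len(phrase) != 0:
--                 caption.append(phrase)
--             flag = False
--             phrase = ""
--             caption.append(tag[0])
--     if len(phrase) != 0 and flag:
--         caption.append(phrase)
--     return caption
-- ===== SOURCE B (Python) =====
-- def combine_word(lemmas_sent):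
--     caption = []
--     i = 0
--     n = len(lemmas_sent)
--     while i < n:
--         if lemmas_sent[i][1] in ("NN", "JJ"):
--             j = i
--             while j < n and lemmas_sent[j][1] in ("NN", "JJ"):
--                 j += 1
--             phrase = "".join(w for w, _ in lemmas_sent[i:j])
--             if phrase:
--                 caption.append(phrase)
--             i = j
--         else:
--             caption.append(lemmas_sent[i][0])
--             i += 1
--     return caption
-- ===== Notes on version B (the rewrite author's own statement) =====
-- stated objective: alternative
-- what changed: Replaces the element-wise flag/phrase state machine with a run-based scan: an outer loop over maximal NN/JJ runs that joins each run into one phrase (appended only if non-empty) and copies non-matching words through.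
import Mathlib
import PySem

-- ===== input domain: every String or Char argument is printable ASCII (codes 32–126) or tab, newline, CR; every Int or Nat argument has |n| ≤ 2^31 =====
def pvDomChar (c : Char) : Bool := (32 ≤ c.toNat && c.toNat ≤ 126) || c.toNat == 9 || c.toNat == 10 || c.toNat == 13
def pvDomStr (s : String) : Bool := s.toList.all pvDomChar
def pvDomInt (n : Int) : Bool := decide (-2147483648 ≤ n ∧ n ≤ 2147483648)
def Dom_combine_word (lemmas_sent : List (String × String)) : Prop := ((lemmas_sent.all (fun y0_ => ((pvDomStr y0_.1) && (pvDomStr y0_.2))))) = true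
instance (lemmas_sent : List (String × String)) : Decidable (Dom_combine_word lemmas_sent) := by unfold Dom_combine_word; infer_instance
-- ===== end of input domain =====

-- B replaces A's element-wise flag/phrase state machine by a run-based scan (outer loop over maximal
-- NN/JJ runs, joining each run); alternative decomposition, same cost, return value proved equal.

-- ===== PORT A =====
-- loop state (flag, phrase, caption), branch order as in the Python for-loop
def cwGo (flag : Bool) (phrase : String) (caption : List String) :
    List (String × String) → List String
  | [] => if phrase ≠ "" ∧ flag then caption ++ [phrase] else caption
  | tag :: rest =>
    if tag.2 == "NN" || tag.2 == "JJ" then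
      cwGo true (phrase ++ tag.1) caption rest
    else
      cwGo false "" ((if phrase ≠ "" then caption ++ [phrase] else caption) ++ [tag.1]) rest

def combine_word (lemmas_sent : List (String × String)) : List String :=
  cwGo false "" [] lemmas_sent

-- ===== PORT B =====
def isNJ (t : String) : Bool := t == "NN" || t == "JJ"

-- outer loop over maximal NN/JJ runs: take the whole run, join it, then continue after it
def cwAltGo : List (String × String) → List String
  | [] => []
  | x :: rest =>
    if isNJ x.2 then
      let run := List.takeWhile (fun p => isNJ p.2) (x :: rest)
      let phrase := String.join (run.map Prod.fst)
      let rest' := List.dropWhile (fun p => isNJ p.2) (x :: rest)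
      (if phrase ≠ "" then [phrase] else []) ++ cwAltGo rest'
    else
      x.1 :: cwAltGo rest
termination_by xs => xs.length
decreasing_by
  · simp only [List.dropWhile]
    have := List.length_dropWhile_le (p := fun p : String × String => isNJ p.2) rest
    simp_all
  · simp

def combine_word_alt (lemmas_sent : List (String × String)) : List String :=
  cwAltGo lemmas_sent

-- ===== PRECONDITION & SPEC =====
def Spec_combine_word (lemmas_sent : List (String × String)) (out : List String) : Prop := out = combine_word_alt lemmas_sent
instance (lemmas_sent : List (String × String)) (out : List String) : Decidable (Spec_combine_word lemmas_sent out) := by unfold Spec_combine_word; infer_instance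

-- ===== CLAIM (what is proved, stated in full; the proofs are below) =====
def Claim_equal_combine_word : Prop := ∀ (lemmas_sent : List (String × String)), Dom_combine_word lemmas_sent → Spec_combine_word lemmas_sent (combine_word lemmas_sent)

-- ===== LEMMAS AND PROOFS =====

-- ===== VERDICT (by name: the statement is the Claim_ definition above) =====
-- caption accumulates on the left
theorem cwGo_caption (xs : List (String × String)) :
    ∀ (flag : Bool) (phrase : String) (caption : List String),
      cwGo flag phrase caption xs = caption ++ cwGo flag phrase [] xs := by
  induction xs with
  | nil =>
    intro flag phrase caption
    simp only [cwGo]; split <;> simp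
  | cons x rest ih =>
    intro flag phrase caption
    simp only [cwGo]
    split
    · rw [ih]
    · rw [ih, ih false "" ((if phrase ≠ "" then [] ++ [phrase] else []) ++ [x.1])]
      split <;> simp

theorem pvJoinCons (a : String) (l : List String) :
    String.join (a :: l) = a ++ String.join l := by
  simp [String.join_eq]

-- the run lemma: from a matching state, A flushes exactly the joined maximal run B computes
theorem cwGo_run (xs : List (String × String)) :
    (∀ phrase : String,
       cwGo true phrase [] xs =
         (if phrase ++ String.join ((List.takeWhile (fun p => isNJ p.2) xs).map Prod.fst) ≠ ""
          then [phrase ++ String.join ((List.takeWhile (fun p => isNJ p.2) xs).map Prod.fst)]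
          else []) ++ cwAltGo (List.dropWhile (fun p => isNJ p.2) xs))
    ∧ cwGo false "" [] xs = cwAltGo xs := by
  induction xs with
  | nil =>
    constructor
    · intro phrase
      simp [cwGo, cwAltGo, String.join]
    · simp [cwGo, cwAltGo]
  | cons x rest ih =>
    by_cases h : isNJ x.2 = true
    · have ht : List.takeWhile (fun p : String × String => isNJ p.2) (x :: rest)
          = x :: List.takeWhile (fun p : String × String => isNJ p.2) rest :=
        List.takeWhile_cons_of_pos (by simpa using h)
      have hd : List.dropWhile (fun p : String × String => isNJ p.2) (x :: rest)
          = List.dropWhile (fun p : String × String => isNJ p.2) rest :=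
        List.dropWhile_cons_of_pos (by simpa using h)
      have hb : (x.2 == "NN" || x.2 == "JJ") = true := h
      have hAlt : cwAltGo (x :: rest) =
          (if x.1 ++ String.join ((List.takeWhile (fun p => isNJ p.2) rest).map Prod.fst) ≠ ""
           then [x.1 ++ String.join ((List.takeWhile (fun p => isNJ p.2) rest).map Prod.fst)]
           else []) ++ cwAltGo (List.dropWhile (fun p => isNJ p.2) rest) := by
        rw [cwAltGo.eq_def]
        simp [h, ht, hd, pvJoinCons]
      constructor
      · intro phrase
        simp only [cwGo, hb, if_pos]
        rw [ih.1 (phrase ++ x.1), ht, hd, List.map_cons, pvJoinCons]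
        simp [String.append_assoc]
      · simp only [cwGo, hb, if_pos]
        rw [ih.1 ("" ++ x.1), hAlt]
        simp
    · have hb : (x.2 == "NN" || x.2 == "JJ") = false := by simpa [isNJ] using h
      have h' : isNJ x.2 = false := by simpa using h
      have ht : List.takeWhile (fun p : String × String => isNJ p.2) (x :: rest)
          = [] := List.takeWhile_cons_of_neg (by simpa using h')
      have hd : List.dropWhile (fun p : String × String => isNJ p.2) (x :: rest)
          = x :: rest := List.dropWhile_cons_of_neg (by simpa using h')
      have hAlt : cwAltGo (x :: rest) = x.1 :: cwAltGo rest := by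
        rw [cwAltGo.eq_def]
        simp [h']
      constructor
      · intro phrase
        simp only [cwGo, hb, Bool.false_eq_true, if_false]
        rw [cwGo_caption, ih.2, ht, hd, hAlt]
        by_cases hp : phrase = "" <;> simp [hp, String.join]
      · simp only [cwGo, hb, Bool.false_eq_true, if_false]
        rw [cwGo_caption, ih.2, hAlt]
        simp

-- ===== VERDICT (by name: the statement is the Claim_ definition above) =====
theorem combine_word_spec : Claim_equal_combine_word := by
  intro xs _
  unfold Spec_combine_word combine_word combine_word_alt
  exact (cwGo_run xs).2
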